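-- pv_equiv track=rewrite | github.com/L-ebesgue/sparse_GPDs | utils.py | is_contained
-- ===== SOURCE A (Python) =====
-- def is_smaller(node1, node2):
--     if node1[0] <= node2[0] and node1[1] <= node2[1]:
--         return True
--     else:
--         return False
--
-- def is_contained(interval_1, interval_2):
--     for src_1 in interval_1[0]:
--         src = False
--         for src_2 in interval_2[0]:
--             if is_smaller(src_2, src_1):
--                 src = True
--                 break
--         if not src:
--             return False
--     for snk_1 in interval_1[1]:
--         snk = False
--         for snk_2 in interval_2[1]:
--             if is_smaller(snk_1, snk_2):
--                 snk = True
--                 break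
--         if not snk:
--             return False
--     return True
-- ===== SOURCE B (Python) =====
-- import bisect
--
-- def _lower_env(points):
--     # sort by x (stable), then prefix minima of y
--     pts = sorted(points, key=lambda p: p[0])
--     xs = [p[0] for p in pts]
--     ms = []
--     m = None
--     for p in pts:
--         m = p[1] if m is None else min(m, p[1])
--         ms.append(m)
--     return (xs, ms)
--
-- def _covered(env, x, y):
--     # is there a point (px, py) with px <= x and py <= y?
--     xs, ms = env
--     i = bisect.bisect_right(xs, x)
--     return i > 0 and ms[i - 1] <= y
--
-- def is_contained(interval_1, interval_2):
--     env_src = _lower_env(interval_2[0])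
--     env_snk = _lower_env([(-x, -y) for (x, y) in interval_2[1]])
--     return (all(_covered(env_src, x, y) for (x, y) in interval_1[0])
--             and all(_covered(env_snk, -x, -y) for (x, y) in interval_1[1]))
-- ===== Notes on version B (the rewrite author's own statement) =====
-- stated objective: faster
-- what changed: B replaces A's per-query linear scan of interval_2 with a one-time sort of each interval_2 side by x plus a prefix-minimum-of-y envelope, answering each interval_1 query by binary search.
import Mathlib
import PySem

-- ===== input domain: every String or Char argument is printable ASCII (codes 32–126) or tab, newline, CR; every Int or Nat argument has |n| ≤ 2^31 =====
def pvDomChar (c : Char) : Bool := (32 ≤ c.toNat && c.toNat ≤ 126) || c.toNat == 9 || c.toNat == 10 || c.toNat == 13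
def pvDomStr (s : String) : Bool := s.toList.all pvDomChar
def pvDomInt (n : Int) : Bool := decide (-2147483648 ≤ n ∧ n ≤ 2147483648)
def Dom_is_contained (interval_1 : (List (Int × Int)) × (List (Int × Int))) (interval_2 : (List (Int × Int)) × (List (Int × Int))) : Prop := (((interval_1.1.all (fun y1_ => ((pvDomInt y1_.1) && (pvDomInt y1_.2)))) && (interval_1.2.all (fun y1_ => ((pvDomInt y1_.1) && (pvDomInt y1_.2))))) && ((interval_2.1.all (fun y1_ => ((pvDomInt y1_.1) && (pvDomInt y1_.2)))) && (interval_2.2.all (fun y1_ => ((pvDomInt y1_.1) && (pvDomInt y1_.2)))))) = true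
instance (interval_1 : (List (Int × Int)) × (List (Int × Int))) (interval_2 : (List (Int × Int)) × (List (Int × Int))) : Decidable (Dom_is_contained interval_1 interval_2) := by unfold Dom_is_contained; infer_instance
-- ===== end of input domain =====

-- B replaces A's per-query linear scan of interval_2 by a one-time sort + prefix-min
-- envelope of each interval_2 side and a binary search per interval_1 point (faster).


-- ===== PORT A =====
-- helper is_smaller(node1, node2)
def is_smaller (node1 node2 : Int × Int) : Bool :=
  if node1.1 ≤ node2.1 ∧ node1.2 ≤ node2.2 then true else false

-- A's inner 'for src_2 in interval_2[0]: … break' loop (flag 'src')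
def aSrcInner (src_1 : Int × Int) : List (Int × Int) → Bool
  | [] => false
  | src_2 :: rest => if is_smaller src_2 src_1 then true else aSrcInner src_1 rest

-- A's first outer loop ('return False' = false, falling through = true)
def aSrcOuter (l2 : List (Int × Int)) : List (Int × Int) → Bool
  | [] => true
  | src_1 :: rest => if !(aSrcInner src_1 l2) then false else aSrcOuter l2 rest

-- A's inner 'for snk_2 in interval_2[1]: … break' loop (flag 'snk')
def aSnkInner (snk_1 : Int × Int) : List (Int × Int) → Bool
  | [] => false
  | snk_2 :: rest => if is_smaller snk_1 snk_2 then true else aSnkInner snk_1 rest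

-- A's second outer loop
def aSnkOuter (l2 : List (Int × Int)) : List (Int × Int) → Bool
  | [] => true
  | snk_1 :: rest => if !(aSnkInner snk_1 l2) then false else aSnkOuter l2 rest

def is_contained (interval_1 : (List (Int × Int)) × (List (Int × Int))) (interval_2 : (List (Int × Int)) × (List (Int × Int))) : Bool :=
  match aSrcOuter interval_2.1 interval_1.1 with
  | false => false
  | true => aSnkOuter interval_2.2 interval_1.2

-- ===== PORT B =====
-- prefix minima of the y coordinates ('m = p[1] if m is None else min(m, p[1]); ms.append(m)')
def bMs : Option Int → List (Int × Int) → List Int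
  | _, [] => []
  | none, p :: rest => p.2 :: bMs (some p.2) rest
  | some m, p :: rest => min m p.2 :: bMs (some (min m p.2)) rest

-- _lower_env(points): sort by x, xs = x's, ms = prefix minima of y's
def bLowerEnv (points : List (Int × Int)) : List Int × List Int :=
  let pts := PySem.List.sorted points (fun p => p.1) false
  (pts.map (fun p => p.1), bMs none pts)

-- _covered(env, x, y)
def bCovered (env : List Int × List Int) (x y : Int) : Bool :=
  let i := PySem.List.bisectRight env.1 x
  decide (0 < i) && decide (env.2.getD (i - 1) 0 ≤ y)

def is_contained_alt (interval_1 : (List (Int × Int)) × (List (Int × Int))) (interval_2 : (List (Int × Int)) × (List (Int × Int))) : Bool :=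
  let envSrc := bLowerEnv interval_2.1
  let envSnk := bLowerEnv (interval_2.2.map (fun p => (-p.1, -p.2)))
  (interval_1.1.all (fun p => bCovered envSrc p.1 p.2)) &&
  (interval_1.2.all (fun p => bCovered envSnk (-p.1) (-p.2)))

-- ===== PRECONDITION & SPEC =====
def Spec_is_contained (interval_1 : (List (Int × Int)) × (List (Int × Int))) (interval_2 : (List (Int × Int)) × (List (Int × Int))) (out : Bool) : Prop := out = is_contained_alt interval_1 interval_2
instance (interval_1 : (List (Int × Int)) × (List (Int × Int))) (interval_2 : (List (Int × Int)) × (List (Int × Int))) (out : Bool) : Decidable (Spec_is_contained interval_1 interval_2 out) := by unfold Spec_is_contained; infer_instance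

-- ===== CLAIM (what is proved, stated in full; the proofs are below) =====
def Claim_equal_is_contained : Prop := ∀ (interval_1 : (List (Int × Int)) × (List (Int × Int))) (interval_2 : (List (Int × Int)) × (List (Int × Int))), Dom_is_contained interval_1 interval_2 → Spec_is_contained interval_1 interval_2 (is_contained interval_1 interval_2)

-- ===== LEMMAS AND PROOFS =====

theorem aSrcInner_eq_any (q : Int × Int) (l : List (Int × Int)) :
    aSrcInner q l = l.any (fun p => is_smaller p q) := by
  induction l with
  | nil => rfl
  | cons p t ih => cases h : is_smaller p q <;> simp [aSrcInner, ih, h]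

theorem aSnkInner_eq_any (q : Int × Int) (l : List (Int × Int)) :
    aSnkInner q l = l.any (fun p => is_smaller q p) := by
  induction l with
  | nil => rfl
  | cons p t ih => cases h : is_smaller q p <;> simp [aSnkInner, ih, h]

theorem aSrcOuter_eq_all (l2 l1 : List (Int × Int)) :
    aSrcOuter l2 l1 = l1.all (fun q => aSrcInner q l2) := by
  induction l1 with
  | nil => rfl
  | cons q t ih => cases h : aSrcInner q l2 <;> simp [aSrcOuter, ih, h]

theorem aSnkOuter_eq_all (l2 l1 : List (Int × Int)) :
    aSnkOuter l2 l1 = l1.all (fun q => aSnkInner q l2) := by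
  induction l1 with
  | nil => rfl
  | cons q t ih => cases h : aSnkInner q l2 <;> simp [aSnkOuter, ih, h]

-- characterisation of the prefix minima: ms[k] ≤ y iff some of the first k+1 y's is ≤ y (or the accumulator is)
theorem bMs_le_iff (l : List (Int × Int)) (acc : Option Int) (k : Nat) (hk : k < l.length) (y : Int) :
    (bMs acc l).getD k 0 ≤ y ↔
      (∃ j, j < l.length ∧ j ≤ k ∧ (l.getD j (0, 0)).2 ≤ y) ∨ (∃ m, acc = some m ∧ m ≤ y) := by
  induction l generalizing acc k with
  | nil => simp at hk
  | cons p t ih =>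
    cases k with
    | zero =>
      cases acc with
      | none =>
        simp only [bMs, List.getD_cons_zero]
        constructor
        · intro h
          exact Or.inl ⟨0, by simp, le_refl 0, by simpa using h⟩
        · rintro (⟨j, _, hj0, hy⟩ | ⟨m, hm, _⟩)
          · have : j = 0 := by omega
            subst this; simpa using hy
          · cases hm
      | some m =>
        simp only [bMs, List.getD_cons_zero]
        constructor
        · intro h
          rcases min_le_iff.mp h with h | h
          · exact Or.inr ⟨m, rfl, h⟩
          · exact Or.inl ⟨0, by simp, le_refl 0, by simpa using h⟩
        · rintro (⟨j, _, hj0, hy⟩ | ⟨m', hm', hy⟩)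
          · have : j = 0 := by omega
            subst this
            exact le_trans (min_le_right _ _) (by simpa using hy)
          · cases hm'
            exact le_trans (min_le_left _ _) hy
    | succ k =>
      have hk' : k < t.length := by simpa using hk
      have shift : ∀ m', ((bMs (some m') t).getD k 0 ≤ y ↔
          (∃ j, j < t.length ∧ j ≤ k ∧ (t.getD j (0, 0)).2 ≤ y) ∨ m' ≤ y) := by
        intro m'
        rw [ih (some m') k hk']
        constructor
        · rintro (h | ⟨m'', hm'', hy⟩)
          · exact Or.inl h
          · cases hm''; exact Or.inr hy
        · rintro (h | h)
          · exact Or.inl h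
          · exact Or.inr ⟨m', rfl, h⟩
      have reidx : ∀ (P : Prop),
          (((∃ j, j < t.length ∧ j ≤ k ∧ (t.getD j (0, 0)).2 ≤ y) ∨ P) ↔
           ((∃ j, j < (p :: t).length ∧ j ≤ k + 1 ∧ 0 < j ∧ ((p :: t).getD j (0, 0)).2 ≤ y) ∨ P)) := by
        intro P
        constructor
        · rintro (⟨j, hj, hjk, hy⟩ | h)
          · exact Or.inl ⟨j + 1, by simpa using hj, by omega, by omega, by simpa using hy⟩
          · exact Or.inr h
        · rintro (⟨j, hj, hjk, hj0, hy⟩ | h)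
          · cases j with
            | zero => omega
            | succ j => exact Or.inl ⟨j, by simpa using hj, by omega, by simpa using hy⟩
          · exact Or.inr h
      cases acc with
      | none =>
        simp only [bMs, List.getD_cons_succ]
        rw [shift p.2]
        constructor
        · rintro (h | h)
          · rcases (reidx False).mp (Or.inl h) with (⟨j, hj, hjk, _, hy⟩ | h')
            · exact Or.inl ⟨j, hj, hjk, hy⟩
            · exact absurd h' (fun c => c)
          · exact Or.inl ⟨0, by simp, by omega, by simpa using h⟩
        · rintro (⟨j, hj, hjk, hy⟩ | ⟨m, hm, _⟩)
          · cases j with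
            | zero => exact Or.inr (by simpa using hy)
            | succ j => exact Or.inl ⟨j, by simpa using hj, by omega, by simpa using hy⟩
          · cases hm
      | some m =>
        simp only [bMs, List.getD_cons_succ]
        rw [shift (min m p.2)]
        constructor
        · rintro (h | h)
          · rcases (reidx False).mp (Or.inl h) with (⟨j, hj, hjk, _, hy⟩ | h')
            · exact Or.inl ⟨j, hj, hjk, hy⟩
            · exact absurd h' (fun c => c)
          · rcases min_le_iff.mp h with h | h
            · exact Or.inr ⟨m, rfl, h⟩
            · exact Or.inl ⟨0, by simp, by omega, by simpa using h⟩
        · rintro (⟨j, hj, hjk, hy⟩ | ⟨m', hm', hy⟩)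
          · cases j with
            | zero => exact Or.inr (le_trans (min_le_right _ _) (by simpa using hy))
            | succ j => exact Or.inl ⟨j, by simpa using hj, by omega, by simpa using hy⟩
          · cases hm'
            exact Or.inr (le_trans (min_le_left _ _) hy)

-- the envelope query answers exactly the dominance question over the original point set
theorem bCovered_eq_any (S : List (Int × Int)) (x y : Int) :
    bCovered (bLowerEnv S) x y = S.any (fun p => decide (p.1 ≤ x ∧ p.2 ≤ y)) := by
  have hperm : (PySem.List.sorted S (fun p => p.1) false).Perm S := PySem.List.sorted_perm S _ _
  set P := PySem.List.sorted S (fun p => p.1) false with hP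
  set xs := P.map (fun p : Int × Int => p.1) with hxs
  have hpair : xs.Pairwise (· ≤ ·) := by
    rw [hxs, hP]; exact PySem.List.sorted_map_key_pairwise S _
  obtain ⟨hle, hbelow, habove⟩ := PySem.List.bisectRight_spec xs x hpair
  set i := PySem.List.bisectRight xs x with hi
  have hlen : xs.length = P.length := by simp [hxs]
  rw [← List.Perm.any_eq hperm]
  rw [Bool.eq_iff_iff]
  simp only [bCovered, bLowerEnv, ← hP, ← hxs, ← hi, Bool.and_eq_true, decide_eq_true_eq,
    List.any_eq_true]
  constructor
  · rintro ⟨hpos, hms⟩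
    have hik : i - 1 < P.length := by omega
    rcases (bMs_le_iff P none (i - 1) hik y).mp hms with (⟨j, hj, hjk, hy⟩ | ⟨m, hm, _⟩)
    · refine ⟨P.getD j (0, 0), ?_, ?_, hy⟩
      · rw [List.getD_eq_getElem P (0,0) hj]; exact List.getElem_mem _
      · have hjx : j < xs.length := by omega
        have := hbelow j hjx (by omega)
        rw [List.getD_eq_getElem P (0,0) hj]
        simpa [hxs] using this
    · cases hm
  · rintro ⟨q, hqmem, hq1, hq2⟩
    obtain ⟨j, hj, hjq⟩ := List.mem_iff_getElem.mp hqmem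
    have hjx : j < xs.length := by omega
    have hxj : xs[j] = q.1 := by simp [hxs, hjq]
    have hji : j < i := by
      by_contra hcon
      have := habove j hjx (by omega)
      rw [hxj] at this; omega
    refine ⟨by omega, ?_⟩
    have hik : i - 1 < P.length := by omega
    refine (bMs_le_iff P none (i - 1) hik y).mpr (Or.inl ⟨j, by omega, by omega, ?_⟩)
    rw [List.getD_eq_getElem P (0,0) hj, hjq]; exact hq2

theorem is_contained_spec' (i1 i2 : (List (Int × Int)) × (List (Int × Int))) :
    is_contained i1 i2 = is_contained_alt i1 i2 := by
  have hsrc : aSrcOuter i2.1 i1.1 = i1.1.all (fun p => bCovered (bLowerEnv i2.1) p.1 p.2) := by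
    rw [aSrcOuter_eq_all]
    refine List.all_congr rfl (fun q => ?_)
    rw [aSrcInner_eq_any, bCovered_eq_any]
    refine List.any_congr rfl (fun p => ?_)
    simp [is_smaller]
  have hsnk : aSnkOuter i2.2 i1.2 =
      i1.2.all (fun p => bCovered (bLowerEnv (i2.2.map (fun p => (-p.1, -p.2)))) (-p.1) (-p.2)) := by
    rw [aSnkOuter_eq_all]
    refine List.all_congr rfl (fun q => ?_)
    rw [aSnkInner_eq_any, bCovered_eq_any, List.any_map]
    refine List.any_congr rfl (fun p => ?_)
    simp only [Function.comp, is_smaller]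
    split_ifs with hc <;> simp <;> omega
  simp only [is_contained, is_contained_alt]
  rw [hsrc, hsnk]
  cases hall : i1.1.all (fun p => bCovered (bLowerEnv i2.1) p.1 p.2) <;> simp

-- ===== VERDICT (by name: the statement is the Claim_ definition above) =====
theorem is_contained_spec : Claim_equal_is_contained := by
  intro i1 i2 _
  exact is_contained_spec' i1 i2
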